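-- pv_equiv track=rewrite | github.com/tomasvanagas/prime-research | experiments/circuit_complexity/per_bit_complexity.py | _count_unique_subfunctions
-- ===== SOURCE A (Python) =====
-- def _count_unique_subfunctions(table, N, order):
--     """Count unique subfunctions when splitting variables in given order."""
--     size = len(table)
--     # Represent current set of subfunctions
--     # Initially one subfunction = the full truth table
--     current_functions = set()
--     current_functions.add(tuple(table))
--
--     total_nodes = 0
--
--     for var in order:
--         total_nodes += len(current_functions)
--         next_functions = set()
--
--         for func in current_functions:
--             n_entries = len(func)
--             # Split func by variable `var`
--             # Variable var has stride 2^(N-1-var) in original bit ordering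
--             # But func may have fewer entries if we've already split
--             # Actually, we need to track which variables remain
--             pass
--
--         # Simpler approach: track by level
--         break
--
--     # Use the most basic approach: unique row count at each bit position
--     total = 0
--     for depth in range(N):
--         var = order[depth]
--         block_size = 1 << (N - depth)
--         half_block = block_size // 2
--
--         # Split table into blocks, count unique blocks
--         n_blocks = len(table) // block_size
--         unique_blocks = set()
--         for i in range(n_blocks):
--             start = i * block_size
--             block = tuple(table[start:start + block_size])
--             unique_blocks.add(block)
--         total += len(unique_blocks)
--
--         # Reduce table by fixing this variable
--         # This is a simplification - not a real OBDD construction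
--
--     return total + 2  # +2 for terminal nodes
-- ===== SOURCE B (Python) =====
-- def _count_unique_subfunctions(table, N, order):
--     """Bottom-up pair-ID canonical labeling: merge adjacent blocks level by
--     level, counting distinct blocks of each size via integer ids instead of
--     re-hashing full tuples at every depth."""
--     ids = list(table)
--     total = 0
--     for _level in range(N):
--         if len(ids) < 2:
--             break  # no full block of this size or larger exists
--         pair_id = {}
--         nxt = []
--         for i in range(0, len(ids) - 1, 2):
--             key = (ids[i], ids[i + 1])
--             if key not in pair_id:
--                 pair_id[key] = len(pair_id)
--             nxt.append(pair_id[key])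
--         total += len(pair_id)
--         ids = nxt
--     return total + 2
-- ===== Notes on version B (the rewrite author's own statement) =====
-- stated objective: faster
-- what changed: Instead of re-slicing the table and hashing full tuple blocks at every one of the N depths, B merges adjacent blocks bottom-up, replacing each distinct pair of block-ids by one canonical integer id per level, so each level costs O(#remaining ids) and the whole run is O(len(table)+N) hashing of O(1)-size keys.
import Mathlib
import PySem

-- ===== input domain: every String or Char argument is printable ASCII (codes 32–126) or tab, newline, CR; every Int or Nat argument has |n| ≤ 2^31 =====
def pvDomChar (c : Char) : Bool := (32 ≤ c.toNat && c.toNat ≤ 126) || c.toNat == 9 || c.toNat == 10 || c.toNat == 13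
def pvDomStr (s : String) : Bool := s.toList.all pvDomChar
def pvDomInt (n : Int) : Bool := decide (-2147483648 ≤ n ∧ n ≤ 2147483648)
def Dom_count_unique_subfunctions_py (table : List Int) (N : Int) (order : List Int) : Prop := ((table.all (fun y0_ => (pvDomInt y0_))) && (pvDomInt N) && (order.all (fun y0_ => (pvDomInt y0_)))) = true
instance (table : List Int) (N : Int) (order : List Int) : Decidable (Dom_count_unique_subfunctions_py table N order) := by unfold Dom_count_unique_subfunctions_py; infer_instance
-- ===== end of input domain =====

-- B replaces A's per-depth re-slicing and tuple-hashing of the table by a bottom-up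
-- pair-ID labeling (merge adjacent block ids level by level); objective: faster.


-- ===== PORT A =====
def count_unique_subfunctions_py (table : List Int) (N : Int) (order : List Int) : Int :=
  let _size : Int := (table.length : Int)
  -- current_functions = set(); current_functions.add(tuple(table))
  let current_functions : PySem.Set (List Int) := PySem.Set.add PySem.Set.empty table
  -- 'for var in order: total_nodes += len(current_functions); for func in …: pass; break'
  -- runs at most one iteration (unconditional break); it only writes total_nodes and
  -- next_functions, which are never read afterwards
  let _total_nodes : Int := if order.isEmpty then 0 else (PySem.Set.len current_functions : Int)
  let total : Int :=
    (PySem.List.pyRange 0 N 1).foldl (fun total depth =>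
      let _var := PySem.List.pyGet? order depth      -- order[depth]: none = IndexError, excluded by Pre_
      let block_size : Int := (1 : Int) <<< (N - depth).toNat  -- 1 << (N - depth); 0 < N - depth for depth ∈ range(N)
      let _half_block : Int := PySem.Int.floordiv block_size 2
      let n_blocks : Int := PySem.Int.floordiv (table.length : Int) block_size
      let unique_blocks : PySem.Set (List Int) :=
        (PySem.List.pyRange 0 n_blocks 1).foldl (fun ub i =>
          let start := i * block_size
          PySem.Set.add ub (PySem.List.slice table (some start) (some (start + block_size))))
          PySem.Set.empty
      total + (PySem.Set.len unique_blocks : Int)) 0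
  total + 2

-- ===== PORT B =====
-- one level: walk the ids two at a time, giving each distinct pair a fresh id
def pvPairLabel (d : PySem.Dict (Int × Int) Int) : List Int → PySem.Dict (Int × Int) Int × List Int
  | a :: b :: rest =>
      let key := (a, b)
      let d' := if d.contains key then d else d.insert key (d.size : Int)
      let v := d'.getD key 0
      let (d'', nxt) := pvPairLabel d' rest
      (d'', v :: nxt)
  | _ => (d, [])

def pvLevelLoop : Nat → List Int → Int → Int
  | 0, _, total => total
  | n + 1, ids, total =>
      if ids.length < 2 then total
      else
        let p := pvPairLabel PySem.Dict.empty ids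
        pvLevelLoop n p.2 (total + (p.1.size : Int))

def count_unique_subfunctions_py_alt (table : List Int) (N : Int) (order : List Int) : Int :=
  pvLevelLoop N.toNat table 0 + 2

-- ===== PRECONDITION & SPEC =====
-- Pre_ excludes exactly the inputs where A raises IndexError at 'var = order[depth]'
-- (a positive N larger than len(order)); A returns on every other input.
def Pre_count_unique_subfunctions_py (table : List Int) (N : Int) (order : List Int) : Prop :=
  N ≤ (order.length : Int) ∨ N ≤ 0
instance (table : List Int) (N : Int) (order : List Int) : Decidable (Pre_count_unique_subfunctions_py table N order) := by unfold Pre_count_unique_subfunctions_py; infer_instance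

def pvWitness_count_unique_subfunctions_py : List Int × Int × List Int := ([0, 1, 1, 0], 2, [0, 1])

def Spec_count_unique_subfunctions_py (table : List Int) (N : Int) (order : List Int) (out : Int) : Prop := out = count_unique_subfunctions_py_alt table N order
instance (table : List Int) (N : Int) (order : List Int) (out : Int) : Decidable (Spec_count_unique_subfunctions_py table N order out) := by unfold Spec_count_unique_subfunctions_py; infer_instance

-- ===== CLAIM (what is proved, stated in full; the proofs are below) =====
def Claim_equal_count_unique_subfunctions_py : Prop := ∀ (table : List Int) (N : Int) (order : List Int), Dom_count_unique_subfunctions_py table N order → Pre_count_unique_subfunctions_py table N order → Spec_count_unique_subfunctions_py table N order (count_unique_subfunctions_py table N order)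


-- ===== LEMMAS AND PROOFS =====

-- number of distinct elements of a list
def pvDcount {α : Type} [DecidableEq α] (l : List α) : Nat := l.toFinset.card

-- the full blocks of size bs, in order (leftover shorter than bs dropped)
def pvChunks (bs : Nat) (t : List Int) : List (List Int) :=
  if h : 0 < bs ∧ bs ≤ t.length then t.take bs :: pvChunks bs (t.drop bs) else []
termination_by t.length
decreasing_by simp; omega

-- consecutive pairs of a list
def pvPairs {α : Type} : List α → List (α × α)
  | a :: b :: rest => (a, b) :: pvPairs rest
  | _ => []

-- concatenation of consecutive pairs
def pvCat : List (List Int) → List (List Int)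
  | x :: y :: rest => (x ++ y) :: pvCat rest
  | _ => []

lemma pvChunks_cons (bs : Nat) (t : List Int) (h : 0 < bs ∧ bs ≤ t.length) :
    pvChunks bs t = t.take bs :: pvChunks bs (t.drop bs) := by
  rw [pvChunks]; rw [dif_pos h]

lemma pvChunks_nil (bs : Nat) (t : List Int) (h : ¬ (0 < bs ∧ bs ≤ t.length)) :
    pvChunks bs t = [] := by
  rw [pvChunks]; rw [dif_neg h]

lemma pvChunks_length (bs : Nat) (hbs : 0 < bs) (t : List Int) : (pvChunks bs t).length = t.length / bs := by
  suffices H : ∀ n t, List.length t = n → (pvChunks bs t).length = t.length / bs from H _ t rfl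
  intro n
  induction n using Nat.strong_induction_on with
  | _ n ih =>
    intro t ht
    rw [pvChunks, Nat.div_eq]
    split_ifs with h
    · simp only [List.length_cons]
      rw [ih (t.drop bs).length (by simp; omega) (t.drop bs) rfl]
      simp
    · simp

lemma pvChunks_mem_length (bs : Nat) (hbs : 0 < bs) (t : List Int) (c : List Int) (hc : c ∈ pvChunks bs t) : c.length = bs := by
  suffices H : ∀ n t, List.length t = n → ∀ c ∈ pvChunks bs t, List.length c = bs from H _ t rfl c hc
  intro n
  induction n using Nat.strong_induction_on with
  | _ n ih =>
    intro t ht c hc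
    rw [pvChunks] at hc
    split_ifs at hc with h
    · rcases List.mem_cons.mp hc with rfl | hc'
      · simp; omega
      · exact ih (t.drop bs).length (by simp; omega) _ rfl c hc'
    · simp at hc

lemma pvChunks_one (t : List Int) : pvChunks 1 t = t.map (fun x => [x]) := by
  induction t with
  | nil => rw [pvChunks]; simp
  | cons x xs ih => rw [pvChunks]; simp [ih]

lemma pvChunks_double (bs : Nat) (hbs : 0 < bs) (t : List Int) : pvCat (pvChunks bs t) = pvChunks (2 * bs) t := by
  suffices H : ∀ n t, List.length t = n → pvCat (pvChunks bs t) = pvChunks (2 * bs) t from H _ t rfl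
  intro n
  induction n using Nat.strong_induction_on with
  | _ n ih =>
    intro t ht
    by_cases h2 : 2 * bs ≤ t.length
    · rw [pvChunks_cons bs t ⟨hbs, by omega⟩,
          pvChunks_cons bs (t.drop bs) ⟨hbs, by simp; omega⟩, pvCat,
          pvChunks_cons (2*bs) t ⟨by omega, h2⟩]
      refine congrArg₂ _ ?_ ?_
      · rw [show 2 * bs = bs + bs by omega, List.take_add]
      · rw [List.drop_drop, show bs + bs = 2 * bs from by omega]
        exact ih (t.drop (2*bs)).length (by simp; omega) _ rfl
    · rw [pvChunks_nil (2*bs) t (by omega)]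
      by_cases h1 : bs ≤ t.length
      · rw [pvChunks_cons bs t ⟨hbs, h1⟩, pvChunks_nil bs (t.drop bs) (by simp; omega)]
        rfl
      · rw [pvChunks_nil bs t (by omega)]
        rfl

lemma pvChunks_eq_map_range (b : Nat) (hb : 0 < b) :
    ∀ (n : Nat) (t : List Int), n = t.length / b →
    (List.range n).map (fun j => (t.drop (j*b)).take b) = pvChunks b t := by
  intro n
  induction n with
  | zero =>
    intro t ht
    rw [List.range_zero, List.map_nil, pvChunks_nil]
    rintro ⟨hb', hle⟩
    rcases Nat.div_eq_zero_iff.mp ht.symm with h | h <;> omega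
  | succ n ihn =>
    intro t ht
    have hble : b ≤ t.length := by
      by_contra h
      rw [Nat.div_eq_of_lt (by omega)] at ht; omega
    have hdiv := Nat.div_eq t.length b
    rw [if_pos ⟨hb, hble⟩] at hdiv
    rw [pvChunks_cons b t ⟨hb, hble⟩, List.range_succ_eq_map, List.map_cons, List.map_map]
    refine congrArg₂ _ (by simp) ?_
    rw [← ihn (t.drop b) (by simp; omega)]
    apply List.map_congr_left
    intro j hj
    simp only [Function.comp_apply]
    rw [List.drop_drop]
    have hsm : j.succ * b = b + j * b := by rw [Nat.succ_mul]; omega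
    rw [hsm]

lemma pvCat_map (φ : Int → List Int) (l : List Int) : pvCat (l.map φ) = (pvPairs l).map (fun q => φ q.1 ++ φ q.2) := by
  suffices H : ∀ n (l : List Int), List.length l = n → pvCat (l.map φ) = (pvPairs l).map (fun q => φ q.1 ++ φ q.2) from H _ l rfl
  intro n
  induction n using Nat.strong_induction_on with
  | _ n ih =>
    intro l hl
    match l with
    | [] => rfl
    | [a] => rfl
    | a :: b :: r =>
      show (φ a ++ φ b) :: pvCat (r.map φ) = (φ a ++ φ b) :: (pvPairs r).map _
      rw [ih r.length (by simp at hl ⊢; omega) r rfl]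

lemma pvPairs_mem {α : Type} (l : List α) (q : α × α) (hq : q ∈ pvPairs l) : q.1 ∈ l ∧ q.2 ∈ l := by
  suffices H : ∀ n (l : List α), List.length l = n → ∀ q ∈ pvPairs l, q.1 ∈ l ∧ q.2 ∈ l from H _ l rfl q hq
  intro n
  induction n using Nat.strong_induction_on with
  | _ n ih =>
    intro l hl q hq
    match l with
    | [] => simp [pvPairs] at hq
    | [a] => simp [pvPairs] at hq
    | a :: b :: r =>
      rcases List.mem_cons.mp (show q ∈ (a, b) :: pvPairs r from hq) with rfl | h
      · simp
      · have := ih r.length (by simp at hl ⊢; omega) r rfl q h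
        exact ⟨List.mem_cons_of_mem _ (List.mem_cons_of_mem _ this.1),
               List.mem_cons_of_mem _ (List.mem_cons_of_mem _ this.2)⟩

lemma pvDcount_map_inj {α β : Type} [DecidableEq α] [DecidableEq β] (l : List α) (f : α → β)
    (hf : ∀ x ∈ l, ∀ y ∈ l, f x = f y → x = y) : pvDcount (l.map f) = pvDcount l := by
  unfold pvDcount
  have himg : (l.map f).toFinset = l.toFinset.image f := by ext x; simp
  rw [himg, Finset.card_image_of_injOn]
  intro x hx y hy
  simp only [Finset.mem_coe, List.mem_toFinset] at hx hy
  exact hf x hx y hy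

-- invariant of the pair dictionary: values are 0..size-1 (bounded) and distinct
def pvDInv (d : PySem.Dict (Int × Int) Int) : Prop :=
  (∀ k v, d.get? k = some v → 0 ≤ v ∧ v < (d.size : Int)) ∧
  (∀ k1 k2 v, d.get? k1 = some v → d.get? k2 = some v → k1 = k2)

lemma pvPairLabel_cons (d : PySem.Dict (Int × Int) Int) (a b : Int) (rest : List Int) :
    pvPairLabel d (a :: b :: rest) =
      (let d' := if d.contains (a, b) then d else d.insert (a, b) (d.size : Int);
       ((pvPairLabel d' rest).1, d'.getD (a, b) 0 :: (pvPairLabel d' rest).2)) := by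
  rw [pvPairLabel]

lemma pvPairLabel_spec (rest : List Int) (d0 : PySem.Dict (Int × Int) Int) (hinv : pvDInv d0) :
    (∀ k v, d0.get? k = some v → (pvPairLabel d0 rest).1.get? k = some v) ∧
    (∀ k ∈ pvPairs rest, ((pvPairLabel d0 rest).1.contains k = true)) ∧
    pvDInv (pvPairLabel d0 rest).1 ∧
    (pvPairLabel d0 rest).2 = (pvPairs rest).map (fun k => (pvPairLabel d0 rest).1.getD k 0) ∧
    (pvPairLabel d0 rest).1.size = d0.size + ((pvPairs rest).filter (fun k => !(d0.contains k))).toFinset.card := by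
  suffices H : ∀ n rest, List.length rest = n → ∀ d0 : PySem.Dict (Int × Int) Int, pvDInv d0 →
      (∀ k v, d0.get? k = some v → (pvPairLabel d0 rest).1.get? k = some v) ∧
      (∀ k ∈ pvPairs rest, ((pvPairLabel d0 rest).1.contains k = true)) ∧
      pvDInv (pvPairLabel d0 rest).1 ∧
      (pvPairLabel d0 rest).2 = (pvPairs rest).map (fun k => (pvPairLabel d0 rest).1.getD k 0) ∧
      (pvPairLabel d0 rest).1.size = d0.size + ((pvPairs rest).filter (fun k => !(d0.contains k))).toFinset.card from
    H _ rest rfl d0 hinv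
  intro n
  induction n using Nat.strong_induction_on with
  | _ n ih =>
    intro rest hn d0 hinv
    match rest with
    | [] =>
      refine ⟨fun k v h => h, by simp [pvPairs], hinv, rfl, by simp [pvPairs, pvPairLabel]⟩
    | [a] =>
      refine ⟨fun k v h => h, by simp [pvPairs], hinv, rfl, by simp [pvPairs, pvPairLabel]⟩
    | a :: b :: r =>
      rw [pvPairLabel_cons]
      by_cases hc : d0.contains (a, b)
      · simp only [hc, if_true]
        obtain ⟨P1, P2, P3, P4, P5⟩ := ih r.length (by simp at hn ⊢; omega) r rfl d0 hinv
        obtain ⟨w, hw⟩ : ∃ w, d0.get? (a, b) = some w := by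
          rcases h : d0.get? (a, b) with _ | w
          · rw [PySem.Dict.get?_eq_none_iff_contains] at h; rw [hc] at h; cases h
          · exact ⟨w, rfl⟩
        refine ⟨P1, ?_, P3, ?_, ?_⟩
        · intro k hk
          rcases List.mem_cons.mp (show k ∈ (a, b) :: pvPairs r from hk) with rfl | hk'
          · have := P1 _ _ hw
            rw [PySem.Dict.contains_eq_isSome_get?, this]; rfl
          · exact P2 _ hk'
        · show _ :: _ = _
          rw [show pvPairs (a :: b :: r) = (a, b) :: pvPairs r from rfl, List.map_cons]
          refine congrArg₂ _ ?_ P4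
          have hg : d0.getD (a, b) 0 = w := by simp [PySem.Dict.getD_eq_get?_getD, hw]
          have hg2 : (pvPairLabel d0 r).1.getD (a, b) 0 = w := by
            simp [PySem.Dict.getD_eq_get?_getD, P1 _ _ hw]
          rw [hg, hg2]
        · rw [show pvPairs (a :: b :: r) = (a, b) :: pvPairs r from rfl, List.filter_cons]
          simp only [hc]
          simpa using P5
      · have hcf : d0.contains (a, b) = false := by simpa using hc
        simp only [hcf, Bool.false_eq_true, if_false]
        set d' := d0.insert (a, b) ((d0.size : Int)) with hd'
        have hget0 : d0.get? (a, b) = none := by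
          rw [PySem.Dict.get?_eq_none_iff_contains]; simpa using hc
        have hsize' : d'.size = d0.size + 1 := by
          rw [hd', PySem.Dict.size_insert]; simp [hc]
        have hget' : ∀ k, d'.get? k = if k = (a, b) then some (d0.size : Int) else d0.get? k := by
          intro k; rw [hd', PySem.Dict.get?_insert]
        have hinv' : pvDInv d' := by
          constructor
          · intro k v h
            rw [hget'] at h
            split_ifs at h with hk
            · cases h; rw [hsize']; push_cast; omega
            · have := hinv.1 _ _ h; rw [hsize']; push_cast at this ⊢; omega
          · intro k1 k2 v h1 h2
            rw [hget'] at h1 h2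
            split_ifs at h1 h2 with hk1 hk2 hk2
            · rw [hk1, hk2]
            · cases h1; have := hinv.1 _ _ h2; omega
            · cases h2; have := hinv.1 _ _ h1; omega
            · exact hinv.2 _ _ _ h1 h2
        obtain ⟨P1, P2, P3, P4, P5⟩ := ih r.length (by simp at hn ⊢; omega) r rfl d' hinv'
        have Q1 : ∀ k v, d0.get? k = some v → (pvPairLabel d' r).1.get? k = some v := by
          intro k v h
          apply P1
          rw [hget']
          split_ifs with hk
          · rw [hk] at h; rw [h] at hget0; cases hget0
          · exact h
        refine ⟨Q1, ?_, P3, ?_, ?_⟩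
        · intro k hk
          rcases List.mem_cons.mp (show k ∈ (a, b) :: pvPairs r from hk) with rfl | hk'
          · have : (pvPairLabel d' r).1.get? (a, b) = some (d0.size : Int) := by
              apply P1; rw [hget']; simp
            rw [PySem.Dict.contains_eq_isSome_get?, this]; rfl
          · exact P2 _ hk'
        · show _ :: _ = _
          rw [show pvPairs (a :: b :: r) = (a, b) :: pvPairs r from rfl, List.map_cons]
          refine congrArg₂ _ ?_ P4
          have hg : d'.getD (a, b) 0 = (d0.size : Int) := by
            simp [PySem.Dict.getD_eq_get?_getD, hget']
          have hg2 : (pvPairLabel d' r).1.getD (a, b) 0 = (d0.size : Int) := by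
            have : (pvPairLabel d' r).1.get? (a, b) = some (d0.size : Int) := by
              apply P1; rw [hget']; simp
            simp [PySem.Dict.getD_eq_get?_getD, this]
          rw [hg, hg2]
        · rw [show pvPairs (a :: b :: r) = (a, b) :: pvPairs r from rfl, List.filter_cons]
          have hcd' : ∀ k, d'.contains k = ((k == (a, b)) || d0.contains k) := by
            intro k; rw [hd', PySem.Dict.contains_insert]
          have hTT : ((pvPairs r).filter (fun k => !(d'.contains k))).toFinset
              = (((pvPairs r).filter (fun k => !(d0.contains k))).toFinset).erase (a, b) := by
            ext k
            simp only [List.mem_toFinset, List.mem_filter, Finset.mem_erase, hcd']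
            constructor
            · rintro ⟨hm, hp⟩
              simp at hp
              exact ⟨by simpa using hp.1, hm, by simp [hp.2]⟩
            · rintro ⟨hne, hm, hp⟩
              refine ⟨hm, ?_⟩
              simp at hp ⊢
              exact ⟨by simpa using hne, hp⟩
          rw [P5, hTT, hsize']
          simp only [hcf]
          simp only [Bool.not_false, if_true]
          rw [List.toFinset_cons]
          set T := ((pvPairs r).filter (fun k => !(d0.contains k))).toFinset with hT
          have : insert (a, b) T = insert (a, b) (T.erase (a, b)) := by
            ext k; simp only [Finset.mem_insert, Finset.mem_erase]; tauto
          rw [this, Finset.card_insert_of_notMem (Finset.notMem_erase _ _)]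
          omega

-- the one-level summary from the empty dictionary
lemma pvLevel_summary (ids : List Int) :
    (pvPairLabel PySem.Dict.empty ids).1.size = pvDcount (pvPairs ids) ∧
    (pvPairLabel PySem.Dict.empty ids).2 = (pvPairs ids).map (fun k => (pvPairLabel PySem.Dict.empty ids).1.getD k 0) ∧
    (∀ k1 ∈ pvPairs ids, ∀ k2 ∈ pvPairs ids, (pvPairLabel PySem.Dict.empty ids).1.getD k1 0 = (pvPairLabel PySem.Dict.empty ids).1.getD k2 0 → k1 = k2) := by
  have hinv : pvDInv PySem.Dict.empty := by
    constructor
    · intro k v h; rw [PySem.Dict.get?_empty] at h; cases h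
    · intro k1 k2 v h1 h2; rw [PySem.Dict.get?_empty] at h1; cases h1
  obtain ⟨P1, P2, P3, P4, P5⟩ := pvPairLabel_spec ids PySem.Dict.empty hinv
  refine ⟨?_, P4, ?_⟩
  · rw [P5]
    have hfil : (pvPairs ids).filter (fun k => !((PySem.Dict.empty : PySem.Dict (Int × Int) Int).contains k)) = pvPairs ids := by
      apply List.filter_eq_self.mpr
      intro k hk
      have : (PySem.Dict.empty : PySem.Dict (Int × Int) Int).contains k = false := by
        rw [← PySem.Dict.get?_eq_none_iff_contains, PySem.Dict.get?_empty]
      simp [this]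
    rw [hfil]
    have hes : (PySem.Dict.empty : PySem.Dict (Int × Int) Int).size = 0 := rfl
    rw [hes]
    unfold pvDcount
    omega
  · intro k1 h1 k2 h2 heq
    have c1 := P2 k1 h1
    have c2 := P2 k2 h2
    obtain ⟨v1, hv1⟩ : ∃ v, (pvPairLabel PySem.Dict.empty ids).1.get? k1 = some v := by
      rcases h : (pvPairLabel PySem.Dict.empty ids).1.get? k1 with _ | v
      · rw [PySem.Dict.get?_eq_none_iff_contains] at h; rw [c1] at h; cases h
      · exact ⟨v, rfl⟩
    obtain ⟨v2, hv2⟩ : ∃ v, (pvPairLabel PySem.Dict.empty ids).1.get? k2 = some v := by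
      rcases h : (pvPairLabel PySem.Dict.empty ids).1.get? k2 with _ | v
      · rw [PySem.Dict.get?_eq_none_iff_contains] at h; rw [c2] at h; cases h
      · exact ⟨v, rfl⟩
    have e1 : (pvPairLabel PySem.Dict.empty ids).1.getD k1 0 = v1 := by
      simp [PySem.Dict.getD_eq_get?_getD, hv1]
    have e2 : (pvPairLabel PySem.Dict.empty ids).1.getD k2 0 = v2 := by
      simp [PySem.Dict.getD_eq_get?_getD, hv2]
    rw [e1, e2] at heq
    subst heq
    exact P3.2 _ _ _ hv1 hv2

-- main loop invariant on the B side
lemma pvLoopB (k : Nat) (ids : List Int) (bs : Nat) (t : List Int) (φ : Int → List Int) (total : Int)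
    (hbs : 0 < bs)
    (hmap : ids.map φ = pvChunks bs t)
    (hinj : ∀ x ∈ ids, ∀ y ∈ ids, φ x = φ y → x = y) :
    pvLevelLoop k ids total = total + ∑ i ∈ Finset.range k, (pvDcount (pvChunks (bs * 2 ^ (i + 1)) t) : Int) := by
  induction k generalizing ids bs φ total with
  | zero => simp [pvLevelLoop]
  | succ k ihk =>
    rw [pvLevelLoop]
    by_cases hlen : ids.length < 2
    · rw [if_pos hlen]
      have hlt : t.length < 2 * bs := by
        have h1 : ids.length = (pvChunks bs t).length := by rw [← hmap]; simp
        rw [pvChunks_length bs hbs t] at h1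
        have := (Nat.div_lt_iff_lt_mul hbs).mp (show t.length / bs < 2 by omega)
        omega
      have hz : ∀ i : Nat, pvDcount (pvChunks (bs * 2 ^ (i + 1)) t) = 0 := by
        intro i
        have h2i : 1 ≤ 2 ^ i := Nat.one_le_two_pow
        have : pvChunks (bs * 2 ^ (i + 1)) t = [] := by
          apply pvChunks_nil
          rw [pow_succ]
          rintro ⟨hp, hle⟩
          nlinarith
        rw [this]
        rfl
      simp [hz]
    · rw [if_neg hlen]
      obtain ⟨hsize, hnxt, hinjlab⟩ := pvLevel_summary ids
      have hlen_φ : ∀ x ∈ ids, (φ x).length = bs := by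
        intro x hx
        exact pvChunks_mem_length bs hbs t _ (hmap ▸ List.mem_map_of_mem hx)
      have hcat : (pvPairs ids).map (fun q => φ q.1 ++ φ q.2) = pvChunks (2 * bs) t := by
        rw [← pvCat_map, hmap, pvChunks_double bs hbs t]
      have hginj : ∀ q ∈ pvPairs ids, ∀ q' ∈ pvPairs ids, φ q.1 ++ φ q.2 = φ q'.1 ++ φ q'.2 → q = q' := by
        intro q hq q' hq' he
        obtain ⟨hq1, hq2⟩ := pvPairs_mem ids q hq
        obtain ⟨hq1', hq2'⟩ := pvPairs_mem ids q' hq'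
        have hl : (φ q.1).length = (φ q'.1).length := by
          rw [hlen_φ _ hq1, hlen_φ _ hq1']
        obtain ⟨e1, e2⟩ := List.append_inj he hl
        exact Prod.ext (hinj _ hq1 _ hq1' e1) (hinj _ hq2 _ hq2' e2)
      set P := pvPairLabel PySem.Dict.empty ids with hP
      set lab := fun q => P.1.getD q 0 with hlab
      have hcount : (P.1.size : Nat) = pvDcount (pvChunks (2 * bs) t) := by
        rw [hsize, ← hcat, pvDcount_map_inj _ _ hginj]
      set φ' : Int → List Int := fun v =>
        match (pvPairs ids).find? (fun q => lab q == v) with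
        | some q => φ q.1 ++ φ q.2
        | none => [] with hφ'def
      have hφ' : ∀ q ∈ pvPairs ids, φ' (lab q) = φ q.1 ++ φ q.2 := by
        intro q hq
        have hex : ((pvPairs ids).find? (fun q' => lab q' == lab q)).isSome := by
          rw [List.find?_isSome]
          exact ⟨q, hq, by simp⟩
        obtain ⟨q0, hq0⟩ := Option.isSome_iff_exists.mp hex
        have hq0mem : q0 ∈ pvPairs ids := List.mem_of_find?_eq_some hq0
        have hq0lab : lab q0 = lab q := by
          have := List.find?_some hq0
          simpa using this
        have : q0 = q := hinjlab _ hq0mem _ hq hq0lab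
        rw [hφ'def]
        simp only [hq0, this]
      have hmap' : P.2.map φ' = pvChunks (2 * bs) t := by
        rw [hnxt, List.map_map, ← hcat]
        apply List.map_congr_left
        intro q hq
        exact hφ' q hq
      have hmem' : ∀ v ∈ P.2, ∃ q ∈ pvPairs ids, v = lab q := by
        intro v hv
        rw [hnxt] at hv
        obtain ⟨q, hq, rfl⟩ := List.mem_map.mp hv
        exact ⟨q, hq, rfl⟩
      have hinj' : ∀ v ∈ P.2, ∀ w ∈ P.2, φ' v = φ' w → v = w := by
        intro v hv w hw he
        obtain ⟨qv, hqv, rfl⟩ := hmem' v hv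
        obtain ⟨qw, hqw, rfl⟩ := hmem' w hw
        rw [hφ' _ hqv, hφ' _ hqw] at he
        rw [hginj _ hqv _ hqw he]
      rw [ihk P.2 (2 * bs) φ' _ (by omega) hmap' hinj']
      rw [Finset.sum_range_succ']
      have hre : ∀ i : Nat, 2 * bs * 2 ^ (i + 1) = bs * 2 ^ (i + 1 + 1) := by
        intro i; ring
      have hsum : ∑ i ∈ Finset.range k, (pvDcount (pvChunks (2 * bs * 2 ^ (i + 1)) t) : Int)
          = ∑ i ∈ Finset.range k, (pvDcount (pvChunks (bs * 2 ^ (i + 1 + 1)) t) : Int) := by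
        apply Finset.sum_congr rfl
        intro i _
        rw [hre i]
      rw [hsum]
      have hc0 : (P.1.size : Int) = (pvDcount (pvChunks (bs * 2 ^ (0 + 1)) t) : Int) := by
        rw [show bs * 2 ^ (0 + 1) = 2 * bs from by ring]
        exact_mod_cast congrArg (fun n : Nat => (n : Int)) hcount
      rw [hc0]
      ring

-- per-depth evaluation of A's inner set loop
lemma pvA_level (table : List Int) (b : Nat) (hb : 0 < b) :
    PySem.Set.len ((PySem.List.pyRange 0 (PySem.Int.floordiv ((table.length : Int)) ((b : Nat) : Int)) 1).foldl
      (fun ub i => PySem.Set.add ub (PySem.List.slice table (some (i * ((b : Nat) : Int))) (some (i * ((b : Nat) : Int) + ((b : Nat) : Int)))))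
      PySem.Set.empty)
    = (pvDcount (pvChunks b table) : Int) := by
  rw [PySem.Int.floordiv_natCast, PySem.List.pyRange_zero_nat, List.foldl_map]
  rw [PySem.List.foldl_congr_mem _ _
      (fun ub j => PySem.Set.add ub ((table.drop (j * b)).take b)) PySem.Set.empty ?_]
  · rw [← PySem.Set.update_map_eq_foldl_add, PySem.Set.update_empty,
        pvChunks_eq_map_range b hb (table.length / b) table rfl]
    have hnd : (PySem.Set.ofList (pvChunks b table)).Nodup := PySem.Set.nodup_ofList _
    have hfin : (PySem.Set.ofList (pvChunks b table)).toFinset = (pvChunks b table).toFinset := by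
      ext x; simp [PySem.Set.mem_ofList]
    have hlen : (PySem.Set.ofList (pvChunks b table)).length = pvDcount (pvChunks b table) := by
      unfold pvDcount
      rw [← hfin, List.toFinset_card_of_nodup hnd]
    simp [PySem.Set.len, hlen]
  · intro acc j hj
    congr 1
    have h1 : (j : Int) * ((b : Nat) : Int) = ((j * b : Nat) : Int) := by push_cast; ring
    rw [h1, show ((j * b : Nat) : Int) + ((b : Nat) : Int) = ((j * b : Nat) : Int) + ((b : Nat) : Int) from rfl]
    exact PySem.List.slice_natCast_add table (j * b) b

lemma pvA_eval (table : List Int) (N : Int) (order : List Int) :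
    count_unique_subfunctions_py table N order =
      (∑ k ∈ Finset.range N.toNat, (pvDcount (pvChunks (2 ^ (N.toNat - k)) table) : Int)) + 2 := by
  by_cases hN : N ≤ 0
  · have h0 : N.toNat = 0 := by omega
    rw [h0]
    simp [count_unique_subfunctions_py, PySem.List.pyRange_one_eq_nil hN]
  · obtain ⟨n, rfl⟩ : ∃ n : Nat, N = (n : Int) := ⟨N.toNat, by omega⟩
    simp only [count_unique_subfunctions_py, Int.toNat_natCast]
    congr 1
    rw [PySem.List.pyRange_zero_nat, List.foldl_map]
    rw [PySem.List.foldl_congr_mem _ _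
      (fun tot k => tot + (pvDcount (pvChunks (2 ^ (n - k)) table) : Int)) 0 ?_]
    · rw [PySem.List.foldl_add, zero_add]
      rfl
    · intro acc k hk
      simp only [List.mem_range] at hk
      have hshift : (1 : Int) <<< ((n : Int) - (k : Int)).toNat = ((2 ^ (n - k) : Nat) : Int) := by
        rw [Int.shiftLeft_eq, show ((n : Int) - (k : Int)).toNat = n - k from by omega]
        push_cast
        ring
      rw [hshift, pvA_level table (2 ^ (n - k)) (Nat.pow_pos (by omega))]

lemma pvB_eval (table : List Int) (N : Int) (order : List Int) :
    count_unique_subfunctions_py_alt table N order =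
      (∑ i ∈ Finset.range N.toNat, (pvDcount (pvChunks (2 ^ (i + 1)) table) : Int)) + 2 := by
  unfold count_unique_subfunctions_py_alt
  congr 1
  rw [pvLoopB N.toNat table 1 table (fun x => [x]) 0 (by omega)
      (by rw [pvChunks_one]) (by intro x _ y _ h; simpa using h)]
  simp

-- ===== VERDICT (by name: the statement is the Claim_ definition above) =====
theorem count_unique_subfunctions_py_spec : Claim_equal_count_unique_subfunctions_py := by
  intro table N order _hdom _hpre
  unfold Spec_count_unique_subfunctions_py
  rw [pvA_eval table N order, pvB_eval]
  congr 1
  have h := Finset.sum_range_reflect (fun i => (pvDcount (pvChunks (2 ^ (i + 1)) table) : Int)) N.toNat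
  rw [← h]
  apply Finset.sum_congr rfl
  intro k hk
  simp only [Finset.mem_range] at hk
  have he : N.toNat - 1 - k + 1 = N.toNat - k := by omega
  rw [he]
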